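-- pv_equiv track=rewrite | github.com/DinomyteHero/Storyteller-V2 | scripts/fix_legacy_companions.py | map_traits_to_axes
-- ===== SOURCE A (Python) =====
-- TRAIT_AXIS_MAP = {
--     # idealist_pragmatic axis (-100 = idealist, 100 = pragmatic)
--     "idealistic": ("idealist_pragmatic", -60),
--     "principled": ("idealist_pragmatic", -40),
--     "pragmatic": ("idealist_pragmatic", 60),
--     "calculating": ("idealist_pragmatic", 50),
--     "analytical": ("idealist_pragmatic", 40),
--
--     # merciful_ruthless axis (-100 = merciful, 100 = ruthless)
--     "merciful": ("merciful_ruthless", -60),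
--     "compassionate": ("merciful_ruthless", -50),
--     "ruthless": ("merciful_ruthless", 80),
--     "cruel": ("merciful_ruthless", 90),
--     "vengeful": ("merciful_ruthless", 70),
--
--     # lawful_rebellious axis (-100 = lawful, 100 = rebellious)
--     "honorable": ("lawful_rebellious", -60),
--     "obedient": ("lawful_rebellious", -70),
--     "disciplined": ("lawful_rebellious", -50),
--     "rebellious": ("lawful_rebellious", 80),
--     "independent": ("lawful_rebellious", 60),
--     "defiant": ("lawful_rebellious", 70),
--
--     # General positive/negative traits (map to reasonable defaults)
--     "protective_of_party": ("merciful_ruthless", -30),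
--     "loyal": ("lawful_rebellious", -30),
--     "wise": ("idealist_pragmatic", -20),
--     "powerful": None,  # Not an axis trait
--     "brilliant": ("idealist_pragmatic", 30),
--     "remorseful": ("merciful_ruthless", -40),
--     "sorrowful": None,
--     "determined": None,
--     "patient": None,
--     "obsessive": None,
--     "precise": ("idealist_pragmatic", 40),
--     "honest": ("lawful_rebellious", -40),
--     "challenging": None,
--     "unapologetic": None,
--     "philosophical": ("idealist_pragmatic", -30),
--     "serene": None,
--     "mysterious": None,
-- }
--
-- def map_traits_to_axes(personality_traits: list[str]) -> dict[str, int]: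
--     """Map personality_traits list to trait axes dict."""
--     axes = {"idealist_pragmatic": 0, "merciful_ruthless": 0, "lawful_rebellious": 0}
--
--     for trait in personality_traits or []:
--         trait_lower = trait.strip().lower()
--         if trait_lower in TRAIT_AXIS_MAP:
--             mapping = TRAIT_AXIS_MAP[trait_lower]
--             if mapping:
--                 axis, value = mapping
--                 # Average multiple values for same axis
--                 if axes[axis] != 0:
--                     axes[axis] = (axes[axis] + value) // 2
--                 else:
--                     axes[axis] = value
--
--     return axes
-- ===== SOURCE B (Python) =====
-- AXIS_TABLES = (
--     ("idealist_pragmatic", {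
--         "idealistic": -60, "principled": -40, "pragmatic": 60,
--         "calculating": 50, "analytical": 40, "wise": -20,
--         "brilliant": 30, "precise": 40, "philosophical": -30,
--     }),
--     ("merciful_ruthless", {
--         "merciful": -60, "compassionate": -50, "ruthless": 80,
--         "cruel": 90, "vengeful": 70, "protective_of_party": -30,
--         "remorseful": -40,
--     }),
--     ("lawful_rebellious", {
--         "honorable": -60, "obedient": -70, "disciplined": -50,
--         "rebellious": 80, "independent": 60, "defiant": 70,
--         "loyal": -30, "honest": -40,
--     }),
-- )
--
--
-- def _axis_score(table, traits):
--     acc = 0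
--     for t in traits:
--         v = table.get(t.strip().lower())
--         if v is not None:
--             acc = v if acc == 0 else (acc + v) // 2
--     return acc
--
--
-- def map_traits_to_axes(personality_traits: list[str]) -> dict[str, int]:
--     """Map personality_traits list to trait axes dict."""
--     traits = personality_traits or []
--     return {axis: _axis_score(table, traits) for axis, table in AXIS_TABLES}
-- ===== Notes on version B (the rewrite author's own statement) =====
-- stated objective: alternative
-- what changed: Inverts the loop nesting: instead of one pass over the traits mutating a dict keyed by axis, B keeps three separate per-axis trait tables (no None entries) and computes each axis independently by its own pass over the traits with a scalar accumulator acc = v if acc == 0 else (acc + v) // 2.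
import Mathlib
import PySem

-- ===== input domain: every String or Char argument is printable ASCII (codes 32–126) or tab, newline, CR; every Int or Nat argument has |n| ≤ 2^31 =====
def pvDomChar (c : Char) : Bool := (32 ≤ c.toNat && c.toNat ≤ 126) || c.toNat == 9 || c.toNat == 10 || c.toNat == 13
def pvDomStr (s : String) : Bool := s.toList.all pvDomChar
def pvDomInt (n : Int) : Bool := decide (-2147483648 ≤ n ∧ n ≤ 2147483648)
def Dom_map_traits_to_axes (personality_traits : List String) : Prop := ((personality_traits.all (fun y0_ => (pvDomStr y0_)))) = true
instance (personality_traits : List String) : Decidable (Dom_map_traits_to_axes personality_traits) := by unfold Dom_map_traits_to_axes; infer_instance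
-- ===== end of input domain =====

-- B inverts the loop nesting: three per-axis trait tables (no None entries), each axis
-- computed by its own pass over the traits with a scalar accumulator (alternative decomposition).

-- ===== PORT A =====
-- TRAIT_AXIS_MAP (None values are Option.none)
def traitList : List (String × Option (String × Int)) := [
  ("idealistic", some ("idealist_pragmatic", -60)),
  ("principled", some ("idealist_pragmatic", -40)),
  ("pragmatic", some ("idealist_pragmatic", 60)),
  ("calculating", some ("idealist_pragmatic", 50)),
  ("analytical", some ("idealist_pragmatic", 40)),
  ("merciful", some ("merciful_ruthless", -60)),
  ("compassionate", some ("merciful_ruthless", -50)),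
  ("ruthless", some ("merciful_ruthless", 80)),
  ("cruel", some ("merciful_ruthless", 90)),
  ("vengeful", some ("merciful_ruthless", 70)),
  ("honorable", some ("lawful_rebellious", -60)),
  ("obedient", some ("lawful_rebellious", -70)),
  ("disciplined", some ("lawful_rebellious", -50)),
  ("rebellious", some ("lawful_rebellious", 80)),
  ("independent", some ("lawful_rebellious", 60)),
  ("defiant", some ("lawful_rebellious", 70)),
  ("protective_of_party", some ("merciful_ruthless", -30)),
  ("loyal", some ("lawful_rebellious", -30)),
  ("wise", some ("idealist_pragmatic", -20)),
  ("powerful", none),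
  ("brilliant", some ("idealist_pragmatic", 30)),
  ("remorseful", some ("merciful_ruthless", -40)),
  ("sorrowful", none),
  ("determined", none),
  ("patient", none),
  ("obsessive", none),
  ("precise", some ("idealist_pragmatic", 40)),
  ("honest", some ("lawful_rebellious", -40)),
  ("challenging", none),
  ("unapologetic", none),
  ("philosophical", some ("idealist_pragmatic", -30)),
  ("serene", none),
  ("mysterious", none)]

def traitAxisMap : PySem.Dict String (Option (String × Int)) := PySem.Dict.ofList traitList

-- the loop body of A (axes[axis] is a guaranteed-present key, ported as getD)
def aStep (axes : PySem.Dict String Int) (trait : String) : PySem.Dict String Int :=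
  let trait_lower := PySem.Str.lower (PySem.Str.strip trait)
  if traitAxisMap.contains trait_lower then
    match traitAxisMap.get? trait_lower with
    | some (some (axis, value)) =>
        if axes.getD axis 0 ≠ 0 then axes.insert axis (PySem.Int.floordiv (axes.getD axis 0 + value) 2)
        else axes.insert axis value
    | _ => axes
  else axes

def map_traits_to_axes (personality_traits : List String) : List (String × Int) :=
  (personality_traits.foldl aStep
    (PySem.Dict.ofList [("idealist_pragmatic", 0), ("merciful_ruthless", 0), ("lawful_rebellious", 0)])).items

-- ===== PORT B =====
-- three per-axis trait tables (Python dicts with unique keys; .get is first-match lookup)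
def ipTable : List (String × Int) :=
  [("idealistic", -60), ("principled", -40), ("pragmatic", 60), ("calculating", 50),
   ("analytical", 40), ("wise", -20), ("brilliant", 30), ("precise", 40), ("philosophical", -30)]

def mrTable : List (String × Int) :=
  [("merciful", -60), ("compassionate", -50), ("ruthless", 80), ("cruel", 90),
   ("vengeful", 70), ("protective_of_party", -30), ("remorseful", -40)]

def lrTable : List (String × Int) :=
  [("honorable", -60), ("obedient", -70), ("disciplined", -50), ("rebellious", 80),
   ("independent", 60), ("defiant", 70), ("loyal", -30), ("honest", -40)]

-- _axis_score: one pass over the traits with a scalar accumulator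
def axisScore (table : List (String × Int)) (traits : List String) : Int :=
  traits.foldl (fun acc t =>
    match table.lookup (PySem.Str.lower (PySem.Str.strip t)) with
    | some v => if acc == 0 then v else PySem.Int.floordiv (acc + v) 2
    | none => acc) 0

def map_traits_to_axes_alt (personality_traits : List String) : List (String × Int) :=
  [("idealist_pragmatic", axisScore ipTable personality_traits),
   ("merciful_ruthless", axisScore mrTable personality_traits),
   ("lawful_rebellious", axisScore lrTable personality_traits)]

-- ===== PRECONDITION & SPEC =====
def Spec_map_traits_to_axes (personality_traits : List String) (out : List (String × Int)) : Prop := out = map_traits_to_axes_alt personality_traits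
instance (personality_traits : List String) (out : List (String × Int)) : Decidable (Spec_map_traits_to_axes personality_traits out) := by unfold Spec_map_traits_to_axes; infer_instance

-- ===== CLAIM =====
def Claim_equal_map_traits_to_axes : Prop := ∀ (personality_traits : List String), Dom_map_traits_to_axes personality_traits → Spec_map_traits_to_axes personality_traits (map_traits_to_axes personality_traits)

-- ===== LEMMAS AND PROOFS =====

-- the matched (axis, value) pairs in trait order (proof-side bridge between the two ports)
def matchedPairs (personality_traits : List String) : List (String × Int) :=
  personality_traits.filterMap (fun t =>
    match traitAxisMap.get? (PySem.Str.lower (PySem.Str.strip t)) with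
    | some (some p) => some p
    | _ => none)

-- the combiner both programs use
def comb (acc v : Int) : Int := if acc == 0 then v else PySem.Int.floordiv (acc + v) 2

lemma ofList_eq_foldl {κ ν : Type} [BEq κ] (L : List (κ × ν)) :
    PySem.Dict.ofList L = L.foldl (fun d p => d.insert p.1 p.2) PySem.Dict.empty := rfl

lemma mem_items_foldl_insert {κ ν : Type} [BEq κ] [LawfulBEq κ] (L : List (κ × ν))
    (d : PySem.Dict κ ν) (p : κ × ν)
    (h : p ∈ (L.foldl (fun d q => d.insert q.1 q.2) d).items) : p ∈ d.items ∨ p ∈ L := by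
  induction L generalizing d with
  | nil => exact Or.inl h
  | cons q L ih =>
    rcases ih _ h with h' | h'
    · rcases (PySem.Dict.mem_items_insert _ _ _ _).mp h' with h'' | h''
      · subst h''; simp
      · exact Or.inl h''.1
    · right; right; exact h'

lemma aux : (traitList.all (fun q => match q.2 with
    | some p => (p.1 == "idealist_pragmatic" || p.1 == "merciful_ruthless" || p.1 == "lawful_rebellious")
    | none => true)) = true := by decide

lemma axis_of_mem (tl : String) (p : String × Int)
    (h : traitAxisMap.get? tl = some (some p)) :
    p.1 = "idealist_pragmatic" ∨ p.1 = "merciful_ruthless" ∨ p.1 = "lawful_rebellious" := by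
  have hm : (tl, some p) ∈ traitAxisMap.items := by
    apply PySem.Dict.mem_items_of_get?_eq_some; assumption
  rw [traitAxisMap, ofList_eq_foldl] at hm
  rcases mem_items_foldl_insert _ _ _ hm with h' | h'
  · simp [PySem.Dict.empty] at h'
  · have := List.all_eq_true.mp aux _ h'
    simp only at this
    rcases p with ⟨a, v⟩
    simp at this
    tauto

-- A's fold over the traits, characterised axis by axis via matchedPairs
lemma main_inv (ts : List String) (i m l : Int) :
    (ts.foldl aStep (PySem.Dict.mk
      [("idealist_pragmatic", i), ("merciful_ruthless", m), ("lawful_rebellious", l)])).items =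
    [("idealist_pragmatic",
        (((matchedPairs ts).filter (fun p => p.1 == "idealist_pragmatic")).map (fun p => p.2)).foldl comb i),
     ("merciful_ruthless",
        (((matchedPairs ts).filter (fun p => p.1 == "merciful_ruthless")).map (fun p => p.2)).foldl comb m),
     ("lawful_rebellious",
        (((matchedPairs ts).filter (fun p => p.1 == "lawful_rebellious")).map (fun p => p.2)).foldl comb l)] := by
  induction ts generalizing i m l with
  | nil => simp [matchedPairs]
  | cons t ts ih =>
    simp only [List.foldl_cons]
    rcases h : traitAxisMap.get? (PySem.Str.lower (PySem.Str.strip t)) with _ | mp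
    · have hc : traitAxisMap.contains (PySem.Str.lower (PySem.Str.strip t)) = false := by
        rw [PySem.Dict.contains_eq_isSome_get?, h]; rfl
      have hs : aStep (PySem.Dict.mk
          [("idealist_pragmatic", i), ("merciful_ruthless", m), ("lawful_rebellious", l)]) t =
          PySem.Dict.mk [("idealist_pragmatic", i), ("merciful_ruthless", m), ("lawful_rebellious", l)] := by
        unfold aStep; simp [hc]
      rw [hs, ih]
      simp [matchedPairs, h]
    · have hc : traitAxisMap.contains (PySem.Str.lower (PySem.Str.strip t)) = true := by
        rw [PySem.Dict.contains_eq_isSome_get?, h]; rfl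
      rcases mp with _ | p
      · have hs : aStep (PySem.Dict.mk
            [("idealist_pragmatic", i), ("merciful_ruthless", m), ("lawful_rebellious", l)]) t =
            PySem.Dict.mk [("idealist_pragmatic", i), ("merciful_ruthless", m), ("lawful_rebellious", l)] := by
          unfold aStep; simp [hc, h]
        rw [hs, ih]
        simp [matchedPairs, h]
      · obtain ⟨axis, value⟩ := p
        have hmp : matchedPairs (t :: ts) = (axis, value) :: matchedPairs ts := by
          simp [matchedPairs, h]
        rcases axis_of_mem _ _ h with ha | ha | ha <;> simp only at ha <;> subst ha
        · have hs : aStep (PySem.Dict.mk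
              [("idealist_pragmatic", i), ("merciful_ruthless", m), ("lawful_rebellious", l)]) t =
              PySem.Dict.mk [("idealist_pragmatic", comb i value), ("merciful_ruthless", m), ("lawful_rebellious", l)] := by
            unfold aStep comb
            simp only [hc, if_true, h]
            by_cases hi : i = 0 <;> simp [hi, PySem.Dict.getD, PySem.Dict.get?, PySem.Dict.insert,
              PySem.Dict.contains]
          rw [hs, ih, hmp]
          simp
        · have hs : aStep (PySem.Dict.mk
              [("idealist_pragmatic", i), ("merciful_ruthless", m), ("lawful_rebellious", l)]) t =
              PySem.Dict.mk [("idealist_pragmatic", i), ("merciful_ruthless", comb m value), ("lawful_rebellious", l)] := by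
            unfold aStep comb
            simp only [hc, if_true, h]
            by_cases hm : m = 0 <;> simp [hm, PySem.Dict.getD, PySem.Dict.get?, PySem.Dict.insert,
              PySem.Dict.contains]
          rw [hs, ih, hmp]
          simp
        · have hs : aStep (PySem.Dict.mk
              [("idealist_pragmatic", i), ("merciful_ruthless", m), ("lawful_rebellious", l)]) t =
              PySem.Dict.mk [("idealist_pragmatic", i), ("merciful_ruthless", m), ("lawful_rebellious", comb l value)] := by
            unfold aStep comb
            simp only [hc, if_true, h]
            by_cases hl : l = 0 <;> simp [hl, PySem.Dict.getD, PySem.Dict.get?, PySem.Dict.insert,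
              PySem.Dict.contains]
          rw [hs, ih, hmp]
          simp

-- keys of the three per-axis tables, for the not-found case
def allKeys : List String := traitList.map Prod.fst

lemma lookup_eq_none_of_not_mem {α : Type} [BEq α] [LawfulBEq α] (l : List (α × Int)) (a : α)
    (h : a ∉ l.map Prod.fst) : l.lookup a = none := by
  induction l with
  | nil => rfl
  | cons p l ih =>
    have h1 : a ≠ p.1 := fun he => h (by simp [he])
    have h2 : a ∉ l.map Prod.fst := fun hm => h (by simp [hm])
    have hb : (a == p.1) = false := beq_eq_false_iff_ne.mpr h1
    simpa [List.lookup, hb] using ih h2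

lemma get?_mk_eq_none_of_not_mem (tl : String) (h : tl ∉ allKeys) :
    (PySem.Dict.mk traitList).get? tl = none := by
  rw [PySem.Dict.get?_eq_none_iff_not_mem_keys]
  simpa [allKeys, PySem.Dict.keys] using h

lemma traitAxisMap_eq_mk : traitAxisMap = PySem.Dict.mk traitList := by decide

-- correspondence between A's single map and B's three tables, for an arbitrary key
lemma lookup_corr (tl : String) :
    (ipTable.lookup tl, mrTable.lookup tl, lrTable.lookup tl) =
    (match traitAxisMap.get? tl with
     | some (some (a, v)) =>
         (if a = "idealist_pragmatic" then some v else none,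
          if a = "merciful_ruthless" then some v else none,
          if a = "lawful_rebellious" then some v else none)
     | _ => ((none : Option Int), (none : Option Int), (none : Option Int))) := by
  by_cases hk : tl ∈ allKeys
  · simp only [allKeys, traitList, List.map] at hk
    rw [traitAxisMap_eq_mk]
    fin_cases hk <;> decide
  · rw [traitAxisMap_eq_mk, get?_mk_eq_none_of_not_mem tl hk]
    have hsub : ∀ (t : List (String × Int)), (t.map Prod.fst).all (· ∈ allKeys) = true →
        tl ∉ t.map Prod.fst := by
      intro t ht hm
      exact hk (List.all_eq_true.mp ht _ hm |> of_decide_eq_true)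
    rw [lookup_eq_none_of_not_mem _ _ (hsub ipTable (by decide)),
        lookup_eq_none_of_not_mem _ _ (hsub mrTable (by decide)),
        lookup_eq_none_of_not_mem _ _ (hsub lrTable (by decide))]

-- the three components of lookup_corr
lemma ip_corr (tl : String) :
    ipTable.lookup tl = (match traitAxisMap.get? tl with
      | some (some (a, v)) => if a = "idealist_pragmatic" then some v else none
      | _ => none) := by
  have H := lookup_corr tl
  rcases h : traitAxisMap.get? tl with _ | (_ | ⟨a, v⟩) <;> rw [h] at H <;>
    exact congrArg (fun x => x.1) H

lemma mr_corr (tl : String) :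
    mrTable.lookup tl = (match traitAxisMap.get? tl with
      | some (some (a, v)) => if a = "merciful_ruthless" then some v else none
      | _ => none) := by
  have H := lookup_corr tl
  rcases h : traitAxisMap.get? tl with _ | (_ | ⟨a, v⟩) <;> rw [h] at H <;>
    exact congrArg (fun x => x.2.1) H

lemma lr_corr (tl : String) :
    lrTable.lookup tl = (match traitAxisMap.get? tl with
      | some (some (a, v)) => if a = "lawful_rebellious" then some v else none
      | _ => none) := by
  have H := lookup_corr tl
  rcases h : traitAxisMap.get? tl with _ | (_ | ⟨a, v⟩) <;> rw [h] at H <;>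
    exact congrArg (fun x => x.2.2) H

-- B's per-axis pass equals the per-axis fold over matchedPairs
lemma axis_fold (table : List (String × Int)) (name : String)
    (hcorr : ∀ tl, table.lookup tl = (match traitAxisMap.get? tl with
      | some (some (a, v)) => if a = name then some v else none
      | _ => none))
    (ts : List String) (acc : Int) :
    ts.foldl (fun acc t =>
      match table.lookup (PySem.Str.lower (PySem.Str.strip t)) with
      | some v => if acc == 0 then v else PySem.Int.floordiv (acc + v) 2
      | none => acc) acc =
    (((matchedPairs ts).filter (fun p => p.1 == name)).map (fun p => p.2)).foldl comb acc := by
  induction ts generalizing acc with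
  | nil => simp [matchedPairs]
  | cons t ts ih =>
    simp only [List.foldl_cons]
    rcases h : traitAxisMap.get? (PySem.Str.lower (PySem.Str.strip t)) with _ | (_ | ⟨a, v⟩)
    · rw [hcorr, h]
      rw [ih]
      simp [matchedPairs, h]
    · rw [hcorr, h]
      rw [ih]
      simp [matchedPairs, h]
    · have hmp : matchedPairs (t :: ts) = (a, v) :: matchedPairs ts := by
        simp [matchedPairs, h]
      have hstep : List.lookup (PySem.Str.lower (PySem.Str.strip t)) table =
          if a = name then some v else none := by rw [hcorr, h]
      by_cases ha : a = name
      · subst ha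
        rw [if_pos rfl] at hstep
        rw [hstep, ih, hmp]
        have hf : List.filter (fun p => p.1 == a) ((a, v) :: matchedPairs ts) =
            (a, v) :: List.filter (fun p => p.1 == a) (matchedPairs ts) := by simp
        rw [hf, List.map_cons, List.foldl_cons]
        rfl
      · rw [if_neg ha] at hstep
        rw [hstep, ih, hmp]
        have hb : (a == name) = false := beq_eq_false_iff_ne.mpr ha
        simp [hb]

-- ===== VERDICT =====
theorem map_traits_to_axes_spec : Claim_equal_map_traits_to_axes := by
  intro ts _
  show _ = _
  unfold map_traits_to_axes map_traits_to_axes_alt axisScore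
  rw [show (PySem.Dict.ofList [("idealist_pragmatic", (0:Int)), ("merciful_ruthless", 0), ("lawful_rebellious", 0)]) = PySem.Dict.mk [("idealist_pragmatic", 0), ("merciful_ruthless", 0), ("lawful_rebellious", 0)] from rfl]
  rw [main_inv, axis_fold ipTable "idealist_pragmatic" ip_corr,
      axis_fold mrTable "merciful_ruthless" mr_corr,
      axis_fold lrTable "lawful_rebellious" lr_corr]
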